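-- pv_equiv track=rewrite | github.com/najibullahsiddiqui/rog_v5 | app/core/category_utils.py | category_from_question
-- ===== SOURCE A (Python) =====
-- ENTITY_ALIASES = {
--     "patent": [
--         "patent", "patents", "pct", "national phase",
--         "patent of addition", "divisional application",
--         "provisional specification", "complete specification",
--     ],
--     "trademark": [
--         "trademark", "trade mark", "trade marks", "trademarks",
--         "service mark", "collective mark", "certification mark",
--         "madrid protocol", "trade dress",
--     ],
--     "copyright": [
--         "copyright", "copyrights", "idea", "title", "slogan",
--         "website", "software", "literary work", "artistic work",
--         "dramatic work", "musical work",
--     ],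
--     "design": [
--         "design", "designs", "industrial design", "article", "set of articles",
--     ],
--     "gi": [
--         "gi", "gis", "geographical indication", "geographical indications",
--         "authorized user", "registered proprietor", "producer",
--     ],
--     "sicld": [
--         "sicld", "layout design", "layout-design",
--         "pcb", "printed circuit board",
--         "semiconductor integrated circuit layout design",
--     ],
-- }
--
-- def category_from_question(question: str) -> str | None:
--     q = (question or "").strip().lower()
--
--     best_category = None
--     best_len = -1
--
--     for category, aliases in ENTITY_ALIASES.items():
--         for alias in aliases:
--             if alias in q and len(alias) > best_len:
--                 best_category = category
--                 best_len = len(alias)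
--
--     return best_category
-- ===== SOURCE B (Python) =====
-- ENTITY_ALIASES = {
--     "patent": [
--         "patent", "patents", "pct", "national phase",
--         "patent of addition", "divisional application",
--         "provisional specification", "complete specification",
--     ],
--     "trademark": [
--         "trademark", "trade mark", "trade marks", "trademarks",
--         "service mark", "collective mark", "certification mark",
--         "madrid protocol", "trade dress",
--     ],
--     "copyright": [
--         "copyright", "copyrights", "idea", "title", "slogan",
--         "website", "software", "literary work", "artistic work",
--         "dramatic work", "musical work",
--     ],
--     "design": [
--         "design", "designs", "industrial design", "article", "set of articles",
--     ],
--     "gi": [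
--         "gi", "gis", "geographical indication", "geographical indications",
--         "authorized user", "registered proprietor", "producer",
--     ],
--     "sicld": [
--         "sicld", "layout design", "layout-design",
--         "pcb", "printed circuit board",
--         "semiconductor integrated circuit layout design",
--     ],
-- }
--
-- def category_from_question(question: str) -> str | None:
--     q = (question or "").strip().lower()
--     pairs = [(category, alias)
--              for category, aliases in ENTITY_ALIASES.items()
--              for alias in aliases]
--     pairs = sorted(pairs, key=lambda p: -len(p[1]))  # stable: ties keep table order
--     for category, alias in pairs:
--         if alias in q:
--             return category
--     return None
-- ===== Notes on version B (the rewrite author's own statement) =====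
-- stated objective: alternative
-- what changed: Replaces the scan-and-track-maximum over the nested alias table with a flattened (category, alias) list stably sorted once by descending alias length, returning the category of the first alias found in the question (early exit).
import Mathlib
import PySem

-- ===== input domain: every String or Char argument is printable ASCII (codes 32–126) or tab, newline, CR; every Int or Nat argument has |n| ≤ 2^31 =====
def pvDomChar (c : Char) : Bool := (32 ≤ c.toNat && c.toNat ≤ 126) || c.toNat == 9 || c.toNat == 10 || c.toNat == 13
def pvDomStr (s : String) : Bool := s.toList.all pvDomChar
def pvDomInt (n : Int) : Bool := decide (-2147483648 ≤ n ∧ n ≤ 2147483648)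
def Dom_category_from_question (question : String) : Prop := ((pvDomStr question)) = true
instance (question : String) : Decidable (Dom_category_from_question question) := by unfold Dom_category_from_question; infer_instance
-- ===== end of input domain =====

-- B replaces A's scan-and-track-maximum over the nested alias table with a flattened
-- (category, alias) list stably sorted by descending alias length, followed by a
-- first-match early-exit scan (objective: alternative).

-- module-level constant shared by both implementations
def ENTITY_ALIASES : List (String × List String) := [
  ("patent", ["patent", "patents", "pct", "national phase",
    "patent of addition", "divisional application",
    "provisional specification", "complete specification"]),
  ("trademark", ["trademark", "trade mark", "trade marks", "trademarks",
    "service mark", "collective mark", "certification mark",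
    "madrid protocol", "trade dress"]),
  ("copyright", ["copyright", "copyrights", "idea", "title", "slogan",
    "website", "software", "literary work", "artistic work",
    "dramatic work", "musical work"]),
  ("design", ["design", "designs", "industrial design", "article", "set of articles"]),
  ("gi", ["gi", "gis", "geographical indication", "geographical indications",
    "authorized user", "registered proprietor", "producer"]),
  ("sicld", ["sicld", "layout design", "layout-design",
    "pcb", "printed circuit board",
    "semiconductor integrated circuit layout design"])]

-- ===== PORT A =====
def category_from_question (question : String) : Option String :=
  let q := PySem.Str.lower (PySem.Str.strip (if question == "" then "" else question))
  let r := ENTITY_ALIASES.foldl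
    (fun (st : Option String × Int) ca =>
      ca.2.foldl (fun st al =>
        if PySem.Str.isIn al q && decide (st.2 < PySem.Str.len al)
        then (some ca.1, PySem.Str.len al) else st) st)
    (none, -1)
  r.1

-- ===== PORT B =====
def category_from_question_alt (question : String) : Option String :=
  let q := PySem.Str.lower (PySem.Str.strip (if question == "" then "" else question))
  let pairs := ENTITY_ALIASES.flatMap (fun ca => ca.2.map (fun al => (ca.1, al)))
  let sortedPairs := PySem.List.sorted pairs (fun p => -(PySem.Str.len p.2)) false
  (sortedPairs.find? (fun p => PySem.Str.isIn p.2 q)).map (fun p => p.1)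

-- ===== PRECONDITION & SPEC =====
def Spec_category_from_question (question : String) (out : Option String) : Prop := out = category_from_question_alt question
instance (question : String) (out : Option String) : Decidable (Spec_category_from_question question out) := by unfold Spec_category_from_question; infer_instance

-- ===== CLAIM (what is proved, stated in full; the proofs are below) =====
def Claim_equal_category_from_question : Prop := ∀ (question : String), Dom_category_from_question question → Spec_category_from_question question (category_from_question question)

-- ===== LEMMAS AND PROOFS =====

-- the flattened (category, alias) table
def pvPairs : List (String × String) :=
  ENTITY_ALIASES.flatMap (fun ca => ca.2.map (fun al => (ca.1, al)))

def pvLen (s : String) : Int := PySem.Str.len s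

-- stable insertion (descending length: insert before the first strictly shorter element)
def pvInsert (x : String × String) : List (String × String) → List (String × String)
  | [] => [x]
  | y :: t => if pvLen x.2 < pvLen y.2 then y :: pvInsert x t else x :: y :: t

def pvIsort : List (String × String) → List (String × String)
  | [] => []
  | x :: t => pvInsert x (pvIsort t)

-- best matching pair: longest alias, ties to the earlier element
def pvBB (P : String → Bool) : List (String × String) → Option (String × String)
  | [] => none
  | x :: t => match pvBB P t with
     | none => if P x.2 then some x else none
     | some y => if P x.2 && decide (pvLen y.2 ≤ pvLen x.2) then some x else some y

theorem pvLen_nonneg (s : String) : 0 ≤ pvLen s := by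
  simp [pvLen, PySem.Str.len]

theorem mem_pvInsert (z x : String × String) (S : List (String × String)) :
    z ∈ pvInsert x S ↔ z = x ∨ z ∈ S := by
  induction S with
  | nil => simp [pvInsert]
  | cons y t ih =>
    by_cases h : pvLen x.2 < pvLen y.2
    · simp only [pvInsert, if_pos h, List.mem_cons, ih]
      tauto
    · simp only [pvInsert, if_neg h, List.mem_cons]

theorem pvInsert_pairwise (x : String × String) (S : List (String × String))
    (hS : S.Pairwise (fun a b => pvLen b.2 ≤ pvLen a.2)) :
    (pvInsert x S).Pairwise (fun a b => pvLen b.2 ≤ pvLen a.2) := by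
  induction S with
  | nil => simp [pvInsert]
  | cons y t ih =>
    rcases List.pairwise_cons.mp hS with ⟨hy, ht⟩
    by_cases h : pvLen x.2 < pvLen y.2
    · simp only [pvInsert, if_pos h]
      refine List.pairwise_cons.mpr ⟨?_, ih ht⟩
      intro z hz
      rcases (mem_pvInsert z x t).mp hz with rfl | hz
      · omega
      · exact hy z hz
    · simp only [pvInsert, if_neg h]
      refine List.pairwise_cons.mpr ⟨?_, hS⟩
      intro z hz
      rcases List.mem_cons.mp hz with rfl | hz
      · omega
      · have := hy z hz; omega

theorem pvIsort_pairwise (ps : List (String × String)) :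
    (pvIsort ps).Pairwise (fun a b => pvLen b.2 ≤ pvLen a.2) := by
  induction ps with
  | nil => simp [pvIsort]
  | cons x t ih => exact pvInsert_pairwise x (pvIsort t) ih

theorem find_pvInsert (P : String → Bool) (x : String × String) (S : List (String × String))
    (hS : S.Pairwise (fun a b => pvLen b.2 ≤ pvLen a.2)) :
    (pvInsert x S).find? (fun p => P p.2) =
      match S.find? (fun p => P p.2) with
      | none => if P x.2 then some x else none
      | some y => if pvLen x.2 < pvLen y.2 then some y
                  else if P x.2 then some x else some y := by
  induction S with
  | nil => simp [pvInsert, List.find?]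
  | cons y t ih =>
    rcases List.pairwise_cons.mp hS with ⟨hy, ht⟩
    by_cases h : pvLen x.2 < pvLen y.2
    · simp only [pvInsert, if_pos h]
      by_cases hpy : P y.2
      · simp [hpy, if_pos h]
      · simp [hpy, ih ht]
    · simp only [pvInsert, if_neg h]
      rcases hf : (y :: t).find? (fun p => P p.2) with _ | z
      · simp only [List.find?_cons, hf]
        cases P x.2 <;> simp
      · have hz : z ∈ y :: t := List.mem_of_find?_eq_some hf
        have hzy : pvLen z.2 ≤ pvLen y.2 := by
          rcases List.mem_cons.mp hz with rfl | hz'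
          · omega
          · exact hy z hz'
        have hnx : ¬ pvLen x.2 < pvLen z.2 := by omega
        simp only [List.find?_cons, hf, if_neg hnx]
        cases P x.2 <;> simp

theorem find_pvIsort (P : String → Bool) (ps : List (String × String)) :
    (pvIsort ps).find? (fun p => P p.2) = pvBB P ps := by
  induction ps with
  | nil => simp [pvIsort, pvBB]
  | cons x t ih =>
    simp only [pvIsort, find_pvInsert P x (pvIsort t) (pvIsort_pairwise t), ih, pvBB]
    rcases pvBB P t with _ | y
    · rfl
    · by_cases hp : P x.2 <;> simp [hp] <;>
        first | rfl | (split_ifs <;> first | rfl | (exfalso; omega))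

theorem loop_eq (P : String → Bool) (ps : List (String × String)) :
    ∀ s : Option String × Int,
    ps.foldl (fun st p =>
        if P p.2 && decide (st.2 < pvLen p.2) then (some p.1, pvLen p.2) else st) s =
      match pvBB P ps with
      | some y => if s.2 < pvLen y.2 then (some y.1, pvLen y.2) else s
      | none => s := by
  induction ps with
  | nil => intro s; simp [pvBB]
  | cons x t ih =>
    intro s
    simp only [List.foldl_cons, ih, pvBB]
    rcases pvBB P t with _ | y
    · by_cases hp : P x.2 <;> by_cases hs : s.2 < pvLen x.2 <;> simp [hp, hs]
    · by_cases hp : P x.2 <;> by_cases hs : s.2 < pvLen x.2 <;>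
        by_cases hl : pvLen y.2 ≤ pvLen x.2 <;>
        simp [hp, hs, hl] <;>
        first
          | rfl
          | omega
          | (split_ifs <;> first
              | rfl
              | (exfalso; omega))

set_option maxRecDepth 20000 in
theorem sorted_pvPairs :
    PySem.List.sorted pvPairs (fun p => -(PySem.Str.len p.2)) false = pvIsort pvPairs := by
  decide

theorem ports_eq (q : String) :
    (ENTITY_ALIASES.foldl
      (fun (st : Option String × Int) ca =>
        ca.2.foldl (fun st al =>
          if PySem.Str.isIn al q && decide (st.2 < PySem.Str.len al)
          then (some ca.1, PySem.Str.len al) else st) st) (none, -1)).1 =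
    ((PySem.List.sorted (ENTITY_ALIASES.flatMap (fun ca => ca.2.map (fun al => (ca.1, al))))
        (fun p => -(PySem.Str.len p.2)) false).find?
        (fun p => PySem.Str.isIn p.2 q)).map (fun p => p.1) := by
  rw [show (ENTITY_ALIASES.flatMap (fun ca => ca.2.map (fun al => (ca.1, al)))) = pvPairs from rfl]
  have hA : (ENTITY_ALIASES.foldl
      (fun (st : Option String × Int) ca =>
        ca.2.foldl (fun st al =>
          if PySem.Str.isIn al q && decide (st.2 < PySem.Str.len al)
          then (some ca.1, PySem.Str.len al) else st) st) (none, -1)) =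
      pvPairs.foldl (fun st p =>
        if (fun al => PySem.Str.isIn al q) p.2 && decide (st.2 < pvLen p.2)
        then (some p.1, pvLen p.2) else st) (none, -1) := by
    simp [pvPairs, List.foldl_flatMap, List.foldl_map, pvLen]
  rw [hA, congrArg Prod.fst (loop_eq (fun al => PySem.Str.isIn al q) pvPairs (none, -1)),
    sorted_pvPairs, find_pvIsort (fun al => PySem.Str.isIn al q) pvPairs]
  rcases pvBB (fun al => PySem.Str.isIn al q) pvPairs with _ | y
  · rfl
  · show (if ((none : Option String), (-1 : Int)).2 < pvLen y.2
        then (some y.1, pvLen y.2) else ((none : Option String), (-1 : Int))).1 = some y.1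
    have h : ((none : Option String), (-1 : Int)).2 < pvLen y.2 := by
      have := pvLen_nonneg y.2
      show (-1 : Int) < pvLen y.2
      omega
    rw [if_pos h]

theorem A_unfold (question : String) : category_from_question question =
    (ENTITY_ALIASES.foldl
      (fun (st : Option String × Int) ca =>
        ca.2.foldl (fun st al =>
          if PySem.Str.isIn al (PySem.Str.lower (PySem.Str.strip (if question == "" then "" else question)))
              && decide (st.2 < PySem.Str.len al)
          then (some ca.1, PySem.Str.len al) else st) st) (none, -1)).1 := rfl

theorem B_unfold (question : String) : category_from_question_alt question =
    ((PySem.List.sorted (ENTITY_ALIASES.flatMap (fun ca => ca.2.map (fun al => (ca.1, al))))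
        (fun p => -(PySem.Str.len p.2)) false).find?
        (fun p => PySem.Str.isIn p.2 (PySem.Str.lower (PySem.Str.strip (if question == "" then "" else question))))).map
      (fun p => p.1) := rfl

-- ===== VERDICT (by name: the statement is the Claim_ definition above) =====
theorem category_from_question_spec : Claim_equal_category_from_question := by
  intro question _
  unfold Spec_category_from_question
  rw [A_unfold, B_unfold]
  exact ports_eq (PySem.Str.lower (PySem.Str.strip (if question == "" then "" else question)))
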